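-- pv_equiv track=rewrite | github.com/lbreede/advent-of-code | python/2021/day_05.py | draw_grid
-- ===== SOURCE A (Python) =====
-- def find_max_axis(data, axis=0):
--     max_axis = 0
--     for row in data:
--         for pos in row:
--             if pos[axis] > max_axis:
--                 max_axis = pos[axis]
--     return max_axis
--
-- def draw_grid(data):
--     grid = []
--
--     max_x_axis = find_max_axis(data)
--     max_y_axis = find_max_axis(data, 1)
--
--     for i in range(max_y_axis + 1):
--         row = []
--         for j in range(max_x_axis + 1):
--             row.append(0)
--         grid.append(row)
--     return grid
-- ===== SOURCE B (Python) =====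
-- def draw_grid(data):
--     # Grow a 1x1 zero grid incrementally: never compute the maxima, just
--     # widen every row / append zero rows whenever a point falls outside.
--     grid = [[0]]
--     for row in data:
--         for x, y in row:
--             w = len(grid[0])
--             if x >= w:
--                 for r in grid:
--                     r.extend([0] * (x + 1 - w))
--             h = len(grid)
--             if y >= h:
--                 grid.extend([0] * len(grid[0]) for _ in range(y + 1 - h))
--     return grid
-- ===== Notes on version B (the rewrite author's own statement) =====
-- stated objective: alternative
-- what changed: B never computes the maxima: instead of two helper scans followed by a sized allocation, it grows a 1x1 zero grid incrementally, widening every row and appending zero rows whenever a point falls outside the current grid.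
import Mathlib
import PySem

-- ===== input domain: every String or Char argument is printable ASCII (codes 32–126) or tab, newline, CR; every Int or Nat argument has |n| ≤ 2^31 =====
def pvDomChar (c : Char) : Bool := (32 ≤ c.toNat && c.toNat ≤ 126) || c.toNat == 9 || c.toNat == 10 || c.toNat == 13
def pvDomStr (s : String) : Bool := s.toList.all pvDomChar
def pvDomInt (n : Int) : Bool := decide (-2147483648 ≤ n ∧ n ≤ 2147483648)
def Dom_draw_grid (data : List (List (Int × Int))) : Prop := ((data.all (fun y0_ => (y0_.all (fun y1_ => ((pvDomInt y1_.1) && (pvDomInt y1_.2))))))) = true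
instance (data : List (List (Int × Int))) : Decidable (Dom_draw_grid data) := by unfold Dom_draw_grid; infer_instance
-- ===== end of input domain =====

-- B replaces A's two max-scans + sized allocation by incremental growth of a 1x1
-- zero grid (widen rows / append rows when a point falls outside) — an alternative
-- algorithm, not claimed faster.

-- ===== PORT A =====
-- pos[axis]: tuple indexing, exact for axis ∈ {0, 1}, the only values A uses
def find_max_axis (data : List (List (Int × Int))) (axis : Int) : Int :=
  data.foldl (fun max_axis row =>
    row.foldl (fun max_axis pos =>
      let v := if axis = 0 then pos.1 else pos.2
      if v > max_axis then v else max_axis) max_axis) 0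

def draw_grid (data : List (List (Int × Int))) : List (List Int) :=
  let max_x_axis := find_max_axis data 0
  let max_y_axis := find_max_axis data 1
  (PySem.List.pyRange 0 (max_y_axis + 1) 1).foldl (fun grid _ =>
    grid ++ [(PySem.List.pyRange 0 (max_x_axis + 1) 1).foldl
      (fun row _ => row ++ [(0 : Int)]) []]) []

-- ===== PORT B =====
-- Source B's inner loop body, one statement per helper: widen every row if x is
-- outside the grid, then append zero rows if y is outside it
def pvWiden (grid : List (List Int)) (x : Int) : List (List Int) :=
  if x ≥ (((grid.headD []).length : Int)) then          -- w = len(grid[0]); grid is never empty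
    grid.map (fun r => r ++ List.replicate (x + 1 - ((grid.headD []).length : Int)).toNat (0 : Int))
  else grid

def pvHeighten (grid : List (List Int)) (y : Int) : List (List Int) :=
  if y ≥ ((grid.length : Int)) then                      -- h = len(grid)
    grid ++ (PySem.List.pyRange 0 (y + 1 - (grid.length : Int)) 1).map
      (fun _ => List.replicate (grid.headD []).length (0 : Int))
  else grid

def pvStepB (grid : List (List Int)) (p : Int × Int) : List (List Int) :=
  pvHeighten (pvWiden grid p.1) p.2

def draw_grid_alt (data : List (List (Int × Int))) : List (List Int) :=
  data.foldl (fun grid row => row.foldl pvStepB grid) [[0]]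

-- ===== PRECONDITION & SPEC =====
def Spec_draw_grid (data : List (List (Int × Int))) (out : List (List Int)) : Prop := out = draw_grid_alt data
instance (data : List (List (Int × Int))) (out : List (List Int)) : Decidable (Spec_draw_grid data out) := by unfold Spec_draw_grid; infer_instance

-- ===== CLAIM (what is proved, stated in full; the proofs are below) =====
def Claim_equal_draw_grid : Prop := ∀ (data : List (List (Int × Int))), Dom_draw_grid data → Spec_draw_grid data (draw_grid data)

-- ===== LEMMAS AND PROOFS =====

-- an h×w grid of zeros
def pvZ (w h : Nat) : List (List Int) := List.replicate h (List.replicate w (0 : Int))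

theorem map_const_eq_replicate {α β : Type} (l : List α) (x : β) :
    l.map (fun _ => x) = List.replicate l.length x := by
  induction l with
  | nil => rfl
  | cons h t ih => simp [List.map_cons, ih, List.replicate_succ]

-- B's step preserves the all-zero rectangular shape, growing each dimension to cover the point
theorem widen_Z (w h : Nat) (x : Int) (hh : 0 < h) :
    pvWiden (pvZ w h) x = pvZ (max w (x + 1).toNat) h := by
  obtain ⟨h', rfl⟩ : ∃ h', h = h' + 1 := ⟨h - 1, by omega⟩
  unfold pvWiden pvZ
  have hhead : (List.replicate (h' + 1) (List.replicate w (0 : Int))).headD [] = List.replicate w 0 := by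
    simp [List.replicate_succ]
  rw [hhead, List.length_replicate]
  by_cases hx : x ≥ (w : Int)
  · rw [if_pos hx, List.map_replicate, ← List.replicate_add]
    congr 2
    omega
  · rw [if_neg hx]
    congr 2
    omega

theorem heighten_Z (w h : Nat) (y : Int) (hh : 0 < h) :
    pvHeighten (pvZ w h) y = pvZ w (max h (y + 1).toNat) := by
  obtain ⟨h', rfl⟩ : ∃ h', h = h' + 1 := ⟨h - 1, by omega⟩
  unfold pvHeighten pvZ
  have hhead : (List.replicate (h' + 1) (List.replicate w (0 : Int))).headD [] = List.replicate w 0 := by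
    simp [List.replicate_succ]
  rw [hhead, List.length_replicate, List.length_replicate]
  by_cases hy : y ≥ ((h' + 1 : Nat) : Int)
  · rw [if_pos hy, map_const_eq_replicate, PySem.List.length_pyRange_one, ← List.replicate_add]
    congr 1
    omega
  · rw [if_neg hy]
    congr 1
    omega

-- B's step preserves the all-zero rectangular shape, growing each dimension to cover the point
theorem stepB_Z (w h : Nat) (p : Int × Int) (hh : 0 < h) :
    pvStepB (pvZ w h) p = pvZ (max w (p.1 + 1).toNat) (max h (p.2 + 1).toNat) := by
  unfold pvStepB
  rw [widen_Z w h p.1 hh, heighten_Z _ h p.2 hh]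

-- folding B's step over a row of points from a zero grid
theorem rowfold_Z (row : List (Int × Int)) (w h : Nat) (hh : 0 < h) :
    row.foldl pvStepB (pvZ w h)
      = pvZ (row.foldl (fun w p => max w (p.1 + 1).toNat) w)
            (row.foldl (fun h p => max h (p.2 + 1).toNat) h) := by
  induction row generalizing w h with
  | nil => rfl
  | cons p t ih =>
    simp only [List.foldl_cons]
    rw [stepB_Z w h p hh]
    exact ih _ _ (by omega)

theorem datafold_Z (data : List (List (Int × Int))) (w h : Nat) (hh : 0 < h) :
    data.foldl (fun grid row => row.foldl pvStepB grid) (pvZ w h)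
      = pvZ (data.foldl (fun w row => row.foldl (fun w p => max w (p.1 + 1).toNat) w) w)
            (data.foldl (fun h row => row.foldl (fun h p => max h (p.2 + 1).toNat) h) h) := by
  induction data generalizing w h with
  | nil => rfl
  | cons r t ih =>
    simp only [List.foldl_cons]
    rw [rowfold_Z r w h hh]
    refine ih _ _ ?_
    have : ∀ (l : List (Int × Int)) (a : Nat), a ≤ l.foldl (fun h p => max h (p.2 + 1).toNat) a := by
      intro l
      induction l with
      | nil => intro a; exact le_rfl
      | cons q s ihs =>
        intro a
        exact le_trans (le_max_left a _) (ihs _)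
    have h1 := this r h
    omega

-- the Int max-fold (A's style) starts no lower than its accumulator
theorem intfold_ge (f : Int × Int → Int) (l : List (Int × Int)) (a : Int) :
    a ≤ l.foldl (fun m p => if f p > m then f p else m) a := by
  induction l generalizing a with
  | nil => exact le_rfl
  | cons p t ih =>
    refine le_trans ?_ (ih _)
    dsimp only
    split_ifs with hc
    · omega
    · exact le_rfl

-- Nat max-fold over a row equals A's Int fold, shifted by one and truncated
theorem row_nat_int (f : Int × Int → Int) (row : List (Int × Int)) (a : Int) (ha : 0 ≤ a) :
    row.foldl (fun w p => max w (f p + 1).toNat) (a + 1).toNat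
      = (row.foldl (fun m p => if f p > m then f p else m) a + 1).toNat := by
  induction row generalizing a with
  | nil => rfl
  | cons p t ih =>
    simp only [List.foldl_cons]
    have hstep : max (a + 1).toNat (f p + 1).toNat = ((if f p > a then f p else a) + 1).toNat := by
      split_ifs <;> omega
    rw [hstep]
    exact ih _ (by split_ifs <;> omega)

theorem data_nat_int (f : Int × Int → Int) (data : List (List (Int × Int))) (a : Int) (ha : 0 ≤ a) :
    data.foldl (fun w row => row.foldl (fun w p => max w (f p + 1).toNat) w) (a + 1).toNat
      = (data.foldl (fun m row => row.foldl (fun m p => if f p > m then f p else m) m) a + 1).toNat := by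
  induction data generalizing a with
  | nil => rfl
  | cons r t ih =>
    simp only [List.foldl_cons]
    rw [row_nat_int f r a ha]
    exact ih _ (le_trans ha (intfold_ge f r a))

theorem foldl_append_const {α β : Type} (l : List α) (x : β) (init : List β) :
    l.foldl (fun acc _ => acc ++ [x]) init = init ++ List.replicate l.length x := by
  induction l generalizing init with
  | nil => simp
  | cons h t ih =>
    simp [List.foldl_cons, ih, List.replicate_succ', List.append_assoc]
    rw [← List.replicate_succ, List.replicate_succ']

-- A builds exactly the zero rectangle sized by the two maxima
theorem drawA_Z (data : List (List (Int × Int))) :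
    draw_grid data = pvZ (find_max_axis data 0 + 1).toNat (find_max_axis data 1 + 1).toNat := by
  unfold draw_grid pvZ
  rw [foldl_append_const, foldl_append_const]
  simp [PySem.List.length_pyRange_one]

theorem find_max_as_fold (data : List (List (Int × Int))) :
    find_max_axis data 0
        = data.foldl (fun m row => row.foldl (fun m p => if p.1 > m then p.1 else m) m) 0
      ∧ find_max_axis data 1
        = data.foldl (fun m row => row.foldl (fun m p => if p.2 > m then p.2 else m) m) 0 := by
  constructor <;> simp [find_max_axis]

-- ===== VERDICT (by name: the statement is the Claim_ definition above) =====
theorem draw_grid_spec : Claim_equal_draw_grid := by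
  intro data _
  unfold Spec_draw_grid draw_grid_alt
  have hinit : ([[0]] : List (List Int)) = pvZ 1 1 := rfl
  rw [hinit, datafold_Z data 1 1 (by omega), drawA_Z]
  obtain ⟨h0, h1⟩ := find_max_as_fold data
  have e0 := data_nat_int (fun p => p.1) data 0 le_rfl
  have e1 := data_nat_int (fun p => p.2) data 0 le_rfl
  unfold pvZ
  rw [show (1 : Nat) = ((0 : Int) + 1).toNat from rfl, e0, e1, h0, h1]
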